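-- pv_equiv track=rewrite | github.com/hcfun/MetalEP | data/data_sampling.py | reidx_train
-- ===== SOURCE A (Python) =====
-- def reidx_train(triples):
--     ent_reidx = dict()
--     rel_reidx = dict()
--     time_reidx = dict()
--
--     entidx = 0
--     relidx = 0
--     timeidx  = 0
--
--     reidx_triples = []
--     for tri in triples:
--         h, r, t, T = tri
--         if h not in ent_reidx.keys():
--             ent_reidx[h] = entidx
--             entidx += 1
--         if t not in ent_reidx.keys():
--             ent_reidx[t] = entidx
--             entidx += 1
--         if r not in rel_reidx.keys():
--             rel_reidx[r] = relidx
--             relidx += 1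
--         if T not in time_reidx.keys():
--             time_reidx[T] = timeidx
--             timeidx += 1
--
--         reidx_triples.append((ent_reidx[h], rel_reidx[r], ent_reidx[t], time_reidx[T]))
--
--     return reidx_triples, ent_reidx, rel_reidx, time_reidx
-- ===== SOURCE B (Python) =====
-- def reidx_train(triples):
--     # stage 1: ordered-dedup the three key streams (entities interleave h before t)
--     ent_keys = list(dict.fromkeys(x for h, _, t, _ in triples for x in (h, t)))
--     rel_keys = list(dict.fromkeys(r for _, r, _, _ in triples))
--     time_keys = list(dict.fromkeys(T for _, _, _, T in triples))
--     # stage 2: ids are positions in the dedupped key lists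
--     ent_reidx = {k: i for i, k in enumerate(ent_keys)}
--     rel_reidx = {k: i for i, k in enumerate(rel_keys)}
--     time_reidx = {k: i for i, k in enumerate(time_keys)}
--     # stage 3: translate the triples through the finished tables
--     reidx_triples = [(ent_reidx[h], rel_reidx[r], ent_reidx[t], time_reidx[T])
--                      for h, r, t, T in triples]
--     return reidx_triples, ent_reidx, rel_reidx, time_reidx
-- ===== Notes on version B (the rewrite author's own statement) =====
-- stated objective: alternative
-- what changed: Replaces A's incremental dict-with-counter construction (one interleaved loop that tests membership, inserts with three running counters and emits output as it goes) by a stream/positional formulation: flatten each field into a key stream, order-preserving dedup via dict.fromkeys, assign ids as positions via enumerate, then translate the triples through the finished tables.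
import Mathlib
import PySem

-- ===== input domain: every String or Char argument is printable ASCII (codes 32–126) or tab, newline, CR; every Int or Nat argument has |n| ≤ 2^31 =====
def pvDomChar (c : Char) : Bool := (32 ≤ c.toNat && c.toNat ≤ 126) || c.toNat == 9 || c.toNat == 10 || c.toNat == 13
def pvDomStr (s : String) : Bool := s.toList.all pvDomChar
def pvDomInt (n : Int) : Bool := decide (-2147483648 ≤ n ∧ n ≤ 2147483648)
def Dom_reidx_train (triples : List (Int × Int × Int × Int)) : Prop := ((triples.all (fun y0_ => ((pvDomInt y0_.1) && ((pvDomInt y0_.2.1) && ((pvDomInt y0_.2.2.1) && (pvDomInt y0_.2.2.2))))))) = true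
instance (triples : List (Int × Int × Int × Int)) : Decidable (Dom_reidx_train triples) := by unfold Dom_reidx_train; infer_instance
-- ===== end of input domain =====

-- B replaces A's incremental dict-with-counter loop by dedup-the-key-streams + positional (enumerate) id tables; same cost (objective: alternative).

-- ===== PORT A =====
-- loop state: (reidx_triples, ent_reidx, rel_reidx, time_reidx, entidx, relidx, timeidx)
def reidxStateA := (List (Int × Int × Int × Int)) × PySem.Dict Int Int × PySem.Dict Int Int × PySem.Dict Int Int × Int × Int × Int

def reidxStepA (s : reidxStateA) (tri : Int × Int × Int × Int) : reidxStateA :=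
  match s, tri with
  | (out, ent, rel, time, entidx, relidx, timeidx), (h, r, t, T) =>
    -- if h not in ent_reidx: ent_reidx[h] = entidx; entidx += 1
    let p1 : PySem.Dict Int Int × Int :=
      if ent.contains h then (ent, entidx) else (ent.insert h entidx, entidx + 1)
    let ent := p1.1; let entidx := p1.2
    let p2 : PySem.Dict Int Int × Int :=
      if ent.contains t then (ent, entidx) else (ent.insert t entidx, entidx + 1)
    let ent := p2.1; let entidx := p2.2
    let p3 : PySem.Dict Int Int × Int :=
      if rel.contains r then (rel, relidx) else (rel.insert r relidx, relidx + 1)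
    let rel := p3.1; let relidx := p3.2
    let p4 : PySem.Dict Int Int × Int :=
      if time.contains T then (time, timeidx) else (time.insert T timeidx, timeidx + 1)
    let time := p4.1; let timeidx := p4.2
    (out ++ [(ent.getD h 0, rel.getD r 0, ent.getD t 0, time.getD T 0)],
     ent, rel, time, entidx, relidx, timeidx)

def reidx_train (triples : List (Int × Int × Int × Int)) : (List (Int × Int × Int × Int)) × (List (Int × Int)) × (List (Int × Int)) × (List (Int × Int)) :=
  match triples.foldl reidxStepA ([], PySem.Dict.empty, PySem.Dict.empty, PySem.Dict.empty, 0, 0, 0) with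
  | (out, ent, rel, time, _, _, _) => (out, ent.items, rel.items, time.items)

-- ===== PORT B =====
-- {k: i for i, k in enumerate(keys)}
def reidxDictOf (ks : List Int) : PySem.Dict Int Int :=
  (PySem.List.enumerate ks 0).foldl (fun d p => d.insert p.2 p.1) PySem.Dict.empty

def reidx_train_alt (triples : List (Int × Int × Int × Int)) : (List (Int × Int × Int × Int)) × (List (Int × Int)) × (List (Int × Int)) × (List (Int × Int)) :=
  -- stage 1: ordered dedup of the three key streams (h before t)
  let entKeys := PySem.List.dedup (triples.flatMap (fun tri => [tri.1, tri.2.2.1]))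
  let relKeys := PySem.List.dedup (triples.map (fun tri => tri.2.1))
  let timeKeys := PySem.List.dedup (triples.map (fun tri => tri.2.2.2))
  -- stage 2: ids are positions in the dedupped key lists
  let ent := reidxDictOf entKeys
  let rel := reidxDictOf relKeys
  let time := reidxDictOf timeKeys
  -- stage 3: translate through the finished tables
  (triples.map (fun tri => (ent.getD tri.1 0, rel.getD tri.2.1 0, ent.getD tri.2.2.1 0, time.getD tri.2.2.2 0)),
   ent.items, rel.items, time.items)

-- ===== PRECONDITION & SPEC =====
def Spec_reidx_train (triples : List (Int × Int × Int × Int)) (out : (List (Int × Int × Int × Int)) × (List (Int × Int)) × (List (Int × Int)) × (List (Int × Int))) : Prop := out = reidx_train_alt triples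
instance (triples : List (Int × Int × Int × Int)) (out : (List (Int × Int × Int × Int)) × (List (Int × Int)) × (List (Int × Int)) × (List (Int × Int))) : Decidable (Spec_reidx_train triples out) := by unfold Spec_reidx_train; infer_instance

-- ===== CLAIM (what is proved, stated in full; the proofs are below) =====
def Claim_equal_reidx_train : Prop := ∀ (triples : List (Int × Int × Int × Int)), Dom_reidx_train triples → Spec_reidx_train triples (reidx_train triples)

-- ===== LEMMAS AND PROOFS =====

-- A's per-key dict action: insert a fresh key at id = current size
def reidxStepD (d : PySem.Dict Int Int) (k : Int) : PySem.Dict Int Int :=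
  if d.contains k then d else d.insert k (d.size : Int)

-- bindings survive a stepD
theorem get?_stepD_stable (d : PySem.Dict Int Int) (k k' v : Int)
    (h : d.get? k = some v) : (reidxStepD d k').get? k = some v := by
  unfold reidxStepD
  split_ifs with hc
  · exact h
  · rcases eq_or_ne k k' with rfl | hne
    · exfalso
      have := PySem.Dict.contains_eq_isSome_get? (d := d) (k := k)
      rw [h] at this; simp at this; exact hc this
    · rw [PySem.Dict.get?_insert_of_ne _ _ hne]; exact h

theorem get?_foldD_stable (ks : List Int) (d : PySem.Dict Int Int) (k v : Int)
    (h : d.get? k = some v) : (ks.foldl reidxStepD d).get? k = some v := by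
  induction ks generalizing d with
  | nil => exact h
  | cons x ks ih => exact ih _ (get?_stepD_stable _ _ _ _ h)

theorem getD_foldD_stable (ks : List Int) (d : PySem.Dict Int Int) (k : Int)
    (hc : d.contains k = true) : (ks.foldl reidxStepD d).getD k 0 = d.getD k 0 := by
  have := PySem.Dict.contains_eq_isSome_get? (d := d) (k := k)
  rw [hc] at this
  obtain ⟨v, hv⟩ := Option.isSome_iff_exists.mp this.symm
  rw [PySem.Dict.getD_of_get?_eq_some _ _ hv,
      PySem.Dict.getD_of_get?_eq_some _ _ (get?_foldD_stable ks d k v hv)]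

theorem contains_stepD_self (d : PySem.Dict Int Int) (k : Int) :
    (reidxStepD d k).contains k = true := by
  unfold reidxStepD
  split_ifs with hc
  · exact hc
  · exact PySem.Dict.contains_insert_self _ _ _

theorem contains_stepD_of (d : PySem.Dict Int Int) (k k' : Int)
    (h : d.contains k = true) : (reidxStepD d k').contains k = true := by
  unfold reidxStepD
  split_ifs with hc
  · exact h
  · rw [PySem.Dict.contains_insert]; simp [h]

-- B's table of a key list
theorem reidxDictOf_snoc (L : List Int) (x : Int) :
    reidxDictOf (L ++ [x]) = (reidxDictOf L).insert x (L.length : Int) := by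
  unfold reidxDictOf
  rw [PySem.List.enumerate_append, List.foldl_append]
  simp

theorem keys_reidxDictOf (L : List Int) :
    (reidxDictOf L).keys = PySem.Set.ofList L := by
  unfold reidxDictOf
  rw [PySem.Dict.keys_foldl_insert_key (key := fun p : Int × Int => p.2)]
  simp [PySem.List.map_snd_enumerate, PySem.Dict.keys_empty]
  rfl

theorem contains_reidxDictOf (L : List Int) (k : Int) :
    (reidxDictOf L).contains k = decide (k ∈ L) := by
  rw [PySem.Dict.contains_eq_decide_mem_keys, keys_reidxDictOf]
  simp [PySem.Set.mem_ofList]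

theorem ofList_eq_self_of_nodup (L : List Int) (h : L.Nodup) :
    PySem.Set.ofList L = L := by
  have key : ∀ (M acc : List Int), M.Nodup → (∀ x ∈ M, x ∉ acc) →
      M.foldl PySem.Set.add acc = acc ++ M := by
    intro M
    induction M with
    | nil => intro acc _ _; simp
    | cons x M ih =>
      intro acc hnd hdisj
      have hx : x ∉ acc := hdisj x (by simp)
      have hadd : PySem.Set.add acc x = acc ++ [x] := by
        simp [PySem.Set.add, PySem.Set.contains, hx]
      rw [List.foldl_cons, hadd, ih (acc ++ [x]) hnd.of_cons]
      · simp
      · intro y hy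
        simp only [List.mem_append, List.mem_singleton]
        rintro (hy' | rfl)
        · exact hdisj y (by simp [hy]) hy'
        · exact (List.nodup_cons.mp hnd).1 hy
  have := key L [] h (by simp)
  simpa [PySem.Set.ofList_eq_foldl] using this

theorem size_reidxDictOf (L : List Int) (h : L.Nodup) :
    (reidxDictOf L).size = L.length := by
  have hk : (reidxDictOf L).keys = L := by rw [keys_reidxDictOf, ofList_eq_self_of_nodup L h]
  have : (reidxDictOf L).keys.length = L.length := by rw [hk]
  simpa [PySem.Dict.keys] using this

-- the incremental fold equals B's positional table of the dedupped stream
theorem foldD_eq_reidxDictOf (ks L : List Int) (h : L.Nodup) :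
    ks.foldl reidxStepD (reidxDictOf L) = reidxDictOf (PySem.Set.update L ks) := by
  induction ks generalizing L with
  | nil => simp [PySem.Set.update]
  | cons k ks ih =>
    have hstep : reidxStepD (reidxDictOf L) k = reidxDictOf (PySem.Set.add L k) := by
      unfold reidxStepD
      rw [contains_reidxDictOf]
      by_cases hm : k ∈ L
      · simp [PySem.Set.add, PySem.Set.contains, hm]
      · rw [size_reidxDictOf L h]
        simp [PySem.Set.add, PySem.Set.contains, hm, reidxDictOf_snoc]
    have hnd : (PySem.Set.add L k).Nodup := by
      by_cases hm : k ∈ L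
      · simpa [PySem.Set.add, PySem.Set.contains, hm] using h
      · simp only [PySem.Set.add, PySem.Set.contains]
        simp [hm, List.nodup_append, h]
        intro a ha hak
        exact hm (hak ▸ ha)
    rw [List.foldl_cons, hstep, ih _ hnd]
    rfl

theorem foldD_eq_dedup (ks : List Int) :
    ks.foldl reidxStepD PySem.Dict.empty = reidxDictOf (PySem.List.dedup ks) := by
  have h0 : (reidxDictOf [] : PySem.Dict Int Int) = PySem.Dict.empty := rfl
  have := foldD_eq_reidxDictOf ks [] (by simp)
  rw [h0] at this
  rw [this, PySem.List.dedup_eq_ofList]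
  rfl

-- A's per-triple step in terms of stepD, counters = sizes
theorem stepA_dict_eq (d : PySem.Dict Int Int) (k : Int) :
    (if d.contains k then (d, (d.size : Int)) else (d.insert k (d.size : Int), (d.size : Int) + 1))
      = (reidxStepD d k, ((reidxStepD d k).size : Int)) := by
  unfold reidxStepD
  by_cases hc : d.contains k = true
  · simp [hc]
  · simp only [hc, Bool.false_eq_true, if_false]
    rw [PySem.Dict.size_insert]
    simp [hc]

-- main invariant: A's fold from counters = sizes produces the outputs looked up in the
-- final stream-fold dicts, and those dicts with their sizes
theorem mainA (rest : List (Int × Int × Int × Int)) (out : List (Int × Int × Int × Int))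
    (ent rel time : PySem.Dict Int Int) :
    rest.foldl reidxStepA (out, ent, rel, time, (ent.size : Int), (rel.size : Int), (time.size : Int))
      = (out ++ rest.map (fun tri =>
           (((rest.flatMap (fun tri => [tri.1, tri.2.2.1])).foldl reidxStepD ent).getD tri.1 0,
            ((rest.map (fun tri => tri.2.1)).foldl reidxStepD rel).getD tri.2.1 0,
            ((rest.flatMap (fun tri => [tri.1, tri.2.2.1])).foldl reidxStepD ent).getD tri.2.2.1 0,
            ((rest.map (fun tri => tri.2.2.2)).foldl reidxStepD time).getD tri.2.2.2 0)),
         (rest.flatMap (fun tri => [tri.1, tri.2.2.1])).foldl reidxStepD ent,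
         (rest.map (fun tri => tri.2.1)).foldl reidxStepD rel,
         (rest.map (fun tri => tri.2.2.2)).foldl reidxStepD time,
         (((rest.flatMap (fun tri => [tri.1, tri.2.2.1])).foldl reidxStepD ent).size : Int),
         (((rest.map (fun tri => tri.2.1)).foldl reidxStepD rel).size : Int),
         (((rest.map (fun tri => tri.2.2.2)).foldl reidxStepD time).size : Int)) := by
  induction rest generalizing out ent rel time with
  | nil => simp
  | cons tri rest ih =>
    obtain ⟨h, r, t, T⟩ := tri
    have hstep : reidxStepA (out, ent, rel, time, (ent.size : Int), (rel.size : Int), (time.size : Int)) (h, r, t, T)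
        = (out ++ [((reidxStepD (reidxStepD ent h) t).getD h 0,
                    (reidxStepD rel r).getD r 0,
                    (reidxStepD (reidxStepD ent h) t).getD t 0,
                    (reidxStepD time T).getD T 0)],
           reidxStepD (reidxStepD ent h) t,
           reidxStepD rel r,
           reidxStepD time T,
           (((reidxStepD (reidxStepD ent h) t).size : Int)),
           (((reidxStepD rel r).size : Int)),
           (((reidxStepD time T).size : Int))) := by
      show reidxStepA _ _ = _
      simp only [reidxStepA]
      rw [stepA_dict_eq ent h, stepA_dict_eq (reidxStepD ent h) t,
          stepA_dict_eq rel r, stepA_dict_eq time T]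
    have hch : (reidxStepD (reidxStepD ent h) t).contains h = true :=
      contains_stepD_of _ _ _ (contains_stepD_self _ _)
    have hct : (reidxStepD (reidxStepD ent h) t).contains t = true := contains_stepD_self _ _
    have hcr : (reidxStepD rel r).contains r = true := contains_stepD_self _ _
    have hcT : (reidxStepD time T).contains T = true := contains_stepD_self _ _
    rw [List.foldl_cons, hstep, ih]
    simp only [List.flatMap_cons, List.map_cons, List.foldl_cons,
      List.cons_append, List.nil_append, List.append_assoc]
    rw [getD_foldD_stable _ (reidxStepD (reidxStepD ent h) t) h hch,
        getD_foldD_stable _ (reidxStepD (reidxStepD ent h) t) t hct,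
        getD_foldD_stable _ (reidxStepD rel r) r hcr,
        getD_foldD_stable _ (reidxStepD time T) T hcT]

-- ===== VERDICT (by name: the statement is the Claim_ definition above) =====
theorem reidx_train_spec : Claim_equal_reidx_train := by
  intro triples _
  show reidx_train triples = reidx_train_alt triples
  unfold reidx_train reidx_train_alt
  have h0 : ((PySem.Dict.empty : PySem.Dict Int Int).size : Int) = 0 := by
    simp [PySem.Dict.size_empty]
  rw [show (([], PySem.Dict.empty, PySem.Dict.empty, PySem.Dict.empty, 0, 0, 0) :
        reidxStateA)
      = ([], PySem.Dict.empty, PySem.Dict.empty, PySem.Dict.empty,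
         ((PySem.Dict.empty : PySem.Dict Int Int).size : Int),
         ((PySem.Dict.empty : PySem.Dict Int Int).size : Int),
         ((PySem.Dict.empty : PySem.Dict Int Int).size : Int)) by rw [h0],
      mainA]
  simp [foldD_eq_dedup]
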